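-- pv_equiv track=rewrite | github.com/MarioFiorino/Python-Workouts | array_subsets.py | find_sub_arr
-- ===== SOURCE A (Python) =====
-- def find_sub_arr(arr):
--   A =  []
--   B =  []
--
--   sumA = 0
--   sumB = 0
--
--   ct = 1 #counter
--
--   while True:
--
--     A.append(arr[len(arr)-ct])
--     while (arr[len(arr)-ct] == arr[len(arr)-(ct+1)]):  # This is for guarantee that intersection from A and B is null
--         ct+=1
--         A.append(arr[len(arr)-ct])
--
--     B = [arr[i] for i in range(0,(len(arr)- ct))] #This B = arr[:(len(arr)-ct)] this works just as well
--
--     sumA = sum(A)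
--     sumB = sum(B)
--
--     if sumA > sumB:
--       break
--
--     else:
--       ct +=1
--
--   return A, B
-- ===== SOURCE B (Python) =====
-- def find_sub_arr(arr):
--     total = sum(arr)
--     A = []
--     sumA = 0
--     k = len(arr)
--     while k > 0:
--         v = arr[k - 1]
--         while k > 0 and arr[k - 1] == v:
--             A.append(v)
--             sumA += v
--             k -= 1
--         if sumA > total - sumA:
--             return A, arr[:k]
--     raise ValueError("no valid split")
-- ===== Notes on version B (the rewrite author's own statement) =====
-- stated objective: alternative
-- what changed: B makes a single right-to-left pass that maintains the suffix sum and total incrementally and slices the prefix once at the end, instead of A's loop that rebuilds the whole prefix list and re-sums both sides at every candidate boundary.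
-- intended difference: On inputs where no boundary of the right-to-left scan satisfies the sum condition before the scan falls off the left end, A wraps around via Python negative indexing and returns a suffix list with duplicated elements (e.g. [1,0,1] -> ([1,0,1,1],[])), while B returns the clean whole-array split ([1,0,1],[]), which is the intended value since the two parts must partition the array. — e.g. on find_sub_arr([1, 0, 1]): A returns ([1, 0, 1, 1], []), B returns ([1, 0, 1], [])
import Mathlib
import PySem

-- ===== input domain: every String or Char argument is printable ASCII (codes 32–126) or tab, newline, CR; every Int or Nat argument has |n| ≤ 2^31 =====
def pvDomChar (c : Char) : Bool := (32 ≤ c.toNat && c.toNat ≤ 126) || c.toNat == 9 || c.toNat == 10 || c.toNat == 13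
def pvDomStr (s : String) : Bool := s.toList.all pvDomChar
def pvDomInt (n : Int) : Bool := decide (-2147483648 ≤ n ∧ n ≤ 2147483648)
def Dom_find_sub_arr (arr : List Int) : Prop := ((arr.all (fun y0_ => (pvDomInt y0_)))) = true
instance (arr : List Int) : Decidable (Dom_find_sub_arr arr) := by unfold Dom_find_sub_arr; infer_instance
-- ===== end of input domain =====

-- B replaces A's rescanning loop (which rebuilds the prefix list and re-sums both sides at
-- every candidate boundary) by one right-to-left pass with incrementally maintained sums;
-- on inputs where A's scan wraps around (D_ below) B returns the clean whole-array split.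

-- ===== PORT A =====
-- inner 'while arr[len-ct] == arr[len-(ct+1)]' loop; fuel only makes the loop total,
-- inside Pre_ it is never exhausted
def pyAInner (arr : List Int) (fuel : Nat) (A : List Int) (ct : Int) :
    Option (List Int × Int) :=
  match fuel with
  | 0 => none
  | f + 1 =>
    match PySem.List.pyGet? arr ((arr.length : Int) - ct),
          PySem.List.pyGet? arr ((arr.length : Int) - (ct + 1)) with
    | some x, some y =>
        if x = y then pyAInner arr f (A ++ [y]) (ct + 1)  -- ct += 1; A.append(arr[len-ct]) (= y)
        else some (A, ct)
    | _, _ => none  -- IndexError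

-- outer 'while True' loop; fuel only makes the loop total, inside Pre_ it is never exhausted
def pyAOuter (arr : List Int) (fuel : Nat) (A : List Int) (ct : Int) :
    Option (List Int × List Int) :=
  match fuel with
  | 0 => none
  | f + 1 =>
    match PySem.List.pyGet? arr ((arr.length : Int) - ct) with
    | none => none  -- IndexError
    | some x =>
      match pyAInner arr (2 * arr.length + 5) (A ++ [x]) ct with
      | none => none
      | some (A1, ct1) =>
        -- B = [arr[i] for i in range(0, len(arr)-ct)]; every generated index is in range,
        -- so pyGetD is exact here
        let B := (PySem.List.pyRange 0 ((arr.length : Int) - ct1) 1).map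
                   (fun i => PySem.List.pyGetD arr i 0)
        if A1.sum > B.sum then some (A1, B) else pyAOuter arr f A1 (ct1 + 1)

def find_sub_arr (arr : List Int) : List Int × List Int :=
  (pyAOuter arr (2 * arr.length + 5) [] 1).getD ([], [])

-- ===== PORT B =====
-- inner 'while k > 0 and arr[k-1] == v' loop; arr[k-1] is always in range, so getD is exact
def pyBInner (arr : List Int) (v : Int) (A : List Int) (sumA : Int) (k : Nat) :
    List Int × Int × Nat :=
  match k with
  | 0 => (A, sumA, 0)
  | k' + 1 =>
      if arr.getD k' 0 = v then pyBInner arr v (A ++ [v]) (sumA + v) k'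
      else (A, sumA, k' + 1)

-- outer 'while k > 0' loop; the 'none' result is Python B's ValueError.
-- k strictly decreases every iteration, so fuel = len(arr) only makes the loop total
def pyBOuter (arr : List Int) (total : Int) (A : List Int) (sumA : Int) (k : Nat) (fuel : Nat) :
    Option (List Int × List Int) :=
  match fuel with
  | 0 => none
  | f + 1 =>
    match k with
    | 0 => none
    | k' + 1 =>
      let v := arr.getD k' 0
      let r := pyBInner arr v A sumA (k' + 1)
      if r.2.1 > total - r.2.1 then some (r.1, arr.take r.2.2)
      else pyBOuter arr total r.1 r.2.1 r.2.2 f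

def find_sub_arr_alt (arr : List Int) : List Int × List Int :=
  (pyBOuter arr arr.sum [] 0 arr.length arr.length).getD ([], [])

-- ===== PRECONDITION & SPEC =====
-- pvStop arr k: A's right-to-left scan pauses at boundary k (the two neighbours differ;
-- at k = 0 A compares arr[0] with arr[-1] = the last element)
def pvStop (arr : List Int) : Nat → Bool
  | 0 => arr.getD 0 0 != arr.getD (arr.length - 1) 0
  | k + 1 => arr.getD k 0 != arr.getD (k + 1) 0

-- Pre_ = exactly the inputs on which Python A returns (elsewhere it raises IndexError):
-- some boundary k is reached with suffix sum > prefix sum (2*suffix > total), either on the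
-- normal pass, or (k ≥ 1, after the scan wraps and sumA has absorbed the whole array) with
-- total + suffix sum > 0
def Pre_find_sub_arr (arr : List Int) : Prop :=
  2 ≤ arr.length ∧ ∃ k, k < arr.length ∧ pvStop arr k = true ∧
    (2 * (arr.drop k).sum > arr.sum ∨ (0 < k ∧ arr.sum + (arr.drop k).sum > 0))
instance (arr : List Int) : Decidable (Pre_find_sub_arr arr) := by
  unfold Pre_find_sub_arr; infer_instance

def pvWitness_find_sub_arr : List Int := [1, 2, 3]

-- On inputs where no boundary of the right-to-left scan satisfies the sum condition before the
-- scan falls off the left end, A wraps around via Python negative indexing and returns a suffix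
-- list with duplicated elements (e.g. [1,0,1] -> ([1,0,1,1],[])), while B returns the clean
-- whole-array split ([1,0,1],[]), the intended value since the two parts must partition the array.
def D_find_sub_arr (arr : List Int) : Prop :=
  0 < arr.sum ∧ ∀ k, k < arr.length →
    arr.getD ((k + arr.length - 1) % arr.length) 0 ≠ arr.getD k 0 →
    2 * (arr.drop k).sum ≤ arr.sum
instance (arr : List Int) : Decidable (D_find_sub_arr arr) := by
  unfold D_find_sub_arr; infer_instance

def Spec_find_sub_arr (arr : List Int) (out : List Int × List Int) : Prop :=
  ¬ D_find_sub_arr arr → out = find_sub_arr_alt arr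
instance (arr : List Int) (out : List Int × List Int) : Decidable (Spec_find_sub_arr arr out) := by
  unfold Spec_find_sub_arr; infer_instance

def pvDiffWitness_find_sub_arr : List Int := [1, 0, 1]
def pvDiffWitnessOut_find_sub_arr : (List Int × List Int) × (List Int × List Int) :=
  (([1, 0, 1, 1], []), ([1, 0, 1], []))

-- ===== CLAIM (what is proved, stated in full; the proofs are below) =====
def Claim_unchanged_find_sub_arr : Prop := ∀ (arr : List Int), Dom_find_sub_arr arr →
  Pre_find_sub_arr arr → Spec_find_sub_arr arr (find_sub_arr arr)
def Claim_changed_find_sub_arr : Prop := Dom_find_sub_arr (pvDiffWitness_find_sub_arr) ∧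
  Pre_find_sub_arr (pvDiffWitness_find_sub_arr) ∧ D_find_sub_arr (pvDiffWitness_find_sub_arr) ∧
  find_sub_arr (pvDiffWitness_find_sub_arr) = pvDiffWitnessOut_find_sub_arr.1 ∧
  find_sub_arr_alt (pvDiffWitness_find_sub_arr) = pvDiffWitnessOut_find_sub_arr.2 ∧
  pvDiffWitnessOut_find_sub_arr.1 ≠ pvDiffWitnessOut_find_sub_arr.2
def Claim_exact_find_sub_arr : Prop := ∀ (arr : List Int), Dom_find_sub_arr arr →
  Pre_find_sub_arr arr → D_find_sub_arr arr → find_sub_arr arr ≠ find_sub_arr_alt arr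

-- ===== LEMMAS AND PROOFS =====

-- reference: first boundary k (scanning j, j-1, …, 0) with pvStop and suffix sum > prefix sum
def refGo (arr : List Int) : Nat → Option (List Int × List Int)
  | 0 =>
      if pvStop arr 0 = true ∧ (arr.drop 0).sum > (arr.take 0).sum then
        some ((arr.drop 0).reverse, arr.take 0)
      else none
  | k + 1 =>
      if pvStop arr (k + 1) = true ∧ (arr.drop (k + 1)).sum > (arr.take (k + 1)).sum then
        some ((arr.drop (k + 1)).reverse, arr.take (k + 1))
      else refGo arr k

theorem refGo_some_stop (arr : List Int) (j : Nat) (r : List Int × List Int)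
    (h : refGo arr j = some r) :
    ∃ i, i ≤ j ∧ pvStop arr i = true ∧ (arr.drop i).sum > (arr.take i).sum := by
  induction j with
  | zero =>
      simp only [refGo] at h
      split at h
      · exact ⟨0, le_refl _, by tauto, by tauto⟩
      · exact absurd h (by simp)
  | succ j ih =>
      simp only [refGo] at h
      split at h
      · exact ⟨j + 1, le_refl _, by tauto, by tauto⟩
      · obtain ⟨i, hi, h1, h2⟩ := ih h
        exact ⟨i, Nat.le_succ_of_le hi, h1, h2⟩

theorem refGo_skip (arr : List Int) (j j' : Nat) (hle : j' ≤ j)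
    (hno : ∀ i, j' < i → i ≤ j → pvStop arr i = false) :
    refGo arr j = refGo arr j' := by
  induction j with
  | zero => have h0 : j' = 0 := Nat.le_zero.mp hle; rw [h0]
  | succ j ih =>
      rcases Nat.eq_or_lt_of_le hle with heq | h
      · rw [heq]
      · have hstop : pvStop arr (j + 1) = false := hno (j + 1) h (le_refl _)
        simp [refGo, hstop]
        exact ih (by omega) (fun i h1 h2 => hno i h1 (by omega))

theorem refGo_stop_some (arr : List Int) (j : Nat)
    (h1 : pvStop arr j = true) (h2 : (arr.drop j).sum > (arr.take j).sum) :
    refGo arr j = some ((arr.drop j).reverse, arr.take j) := by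
  cases j with
  | zero => simp only [refGo]; rw [if_pos ⟨h1, h2⟩]
  | succ j => simp only [refGo]; rw [if_pos ⟨h1, h2⟩]

theorem refGo_stop_none (arr : List Int) (j : Nat)
    (h2 : ¬ (arr.drop j).sum > (arr.take j).sum) :
    refGo arr j = if j = 0 then none else refGo arr (j - 1) := by
  cases j with
  | zero => simp only [refGo]; rw [if_neg (by tauto)]; simp
  | succ j => simp only [refGo]; rw [if_neg (by tauto)]; simp

theorem refGo_isSome (arr : List Int) (k j : Nat) (hk : k ≤ j)
    (h1 : pvStop arr k = true) (h2 : (arr.drop k).sum > (arr.take k).sum) :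
    (refGo arr j).isSome := by
  induction j with
  | zero =>
      have : k = 0 := by omega
      subst this
      rw [refGo_stop_some arr 0 h1 h2]; rfl
  | succ j ih =>
      rcases Nat.eq_or_lt_of_le hk with h | h
      · rw [← h, refGo_stop_some arr k h1 h2]; rfl
      · simp only [refGo]
        split
        · rfl
        · exact ih (by omega)

-- sums: suffix > prefix  ↔  sumA > total - sumA
theorem sum_split (arr : List Int) (k : Nat) :
    ((arr.drop k).sum > (arr.take k).sum) ↔ ((arr.drop k).sum > arr.sum - (arr.drop k).sum) := by
  have h := List.sum_take_add_sum_drop arr k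
  omega

-- accumulator step: reversed suffix grows by one element on the left boundary
theorem rev_drop_step (arr : List Int) (j : Nat) (hj : j < arr.length) :
    (arr.drop (j + 1)).reverse ++ [arr.getD j 0] = (arr.drop j).reverse := by
  rw [List.getD_eq_getElem arr 0 hj, List.drop_eq_getElem_cons hj, List.reverse_cons]

theorem sum_drop_step (arr : List Int) (j : Nat) (hj : j < arr.length) :
    (arr.drop (j + 1)).sum + arr.getD j 0 = (arr.drop j).sum := by
  rw [List.getD_eq_getElem arr 0 hj]
  conv_rhs => rw [List.drop_eq_getElem_cons hj]
  rw [List.sum_cons]; ring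

-- the comprehension [arr[i] for i in range(0, j)] is the prefix take j
theorem comp_take (arr : List Int) (j : Nat) (hj : j ≤ arr.length) :
    (PySem.List.pyRange 0 ((j : Int)) 1).map (fun i => PySem.List.pyGetD arr i 0) = arr.take j := by
  rw [PySem.List.pyRange_zero_natCast, List.map_map]
  apply List.ext_getElem
  · simp [Nat.min_eq_left hj]
  · intro i h1 h2
    simp only [List.getElem_map, List.getElem_range, Function.comp_apply,
      PySem.List.pyGetD_natCast, List.getElem_take]
    rw [List.getD_eq_getElem arr 0 (by simp at h1; omega)]

-- pyGet? at boundary j, written with ct = len - j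
theorem pyGet_at (arr : List Int) (j : Nat) (hj : j < arr.length) :
    PySem.List.pyGet? arr ((arr.length : Int) - ((arr.length : Int) - (j : Int))) =
      some (arr.getD j 0) := by
  have : (arr.length : Int) - ((arr.length : Int) - (j : Int)) = (j : Int) := by ring
  rw [this, PySem.List.pyGet?_natCast, List.getElem?_eq_getElem hj,
    List.getD_eq_getElem arr 0 hj]

-- ===== A-side loop characterisation =====
theorem innerA (arr : List Int) :
    ∀ j f, j < arr.length → j + 1 ≤ f → (∃ i, i ≤ j ∧ pvStop arr i = true) →
    ∃ j', j' ≤ j ∧ pvStop arr j' = true ∧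
      (∀ i, j' < i → i ≤ j → pvStop arr i = false) ∧
      pyAInner arr f ((arr.drop j).reverse) ((arr.length : Int) - (j : Int)) =
        some ((arr.drop j').reverse, (arr.length : Int) - (j' : Int)) := by
  intro j
  induction j with
  | zero =>
      intro f hn hf hex
      obtain ⟨i, hi0, hstop⟩ := hex
      have hi : i = 0 := by omega
      subst hi
      obtain ⟨f', rfl⟩ : ∃ f', f = f' + 1 := ⟨f - 1, by omega⟩
      refine ⟨0, le_refl _, hstop, by omega, ?_⟩
      have hne : arr[0] ≠ arr[arr.length - 1] := by
        simp only [pvStop, bne_iff_ne] at hstop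
        rw [List.getD_eq_getElem arr 0 hn, List.getD_eq_getElem arr 0 (by omega)] at hstop
        exact hstop
      simp only [pyAInner, Nat.cast_zero, sub_zero, sub_self]
      rw [show (arr.length : Int) - ((arr.length : Int) + 1) = -1 by ring]
      rw [PySem.List.pyGet?_zero, PySem.List.pyGet?_neg_one,
        List.getElem?_eq_getElem hn, List.getLast?_eq_getElem?,
        List.getElem?_eq_getElem (by omega : arr.length - 1 < arr.length)]
      dsimp only
      rw [if_neg hne]
  | succ j ih =>
      intro f hj hf hex
      obtain ⟨f', rfl⟩ : ∃ f', f = f' + 1 := ⟨f - 1, by omega⟩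
      by_cases hstop : pvStop arr (j + 1) = true
      · refine ⟨j + 1, le_refl _, hstop, by omega, ?_⟩
        have hne : arr.getD (j + 1) 0 ≠ arr.getD j 0 := by
          simp only [pvStop, bne_iff_ne] at hstop
          exact fun h => hstop h.symm
        simp only [pyAInner]
        rw [pyGet_at arr (j + 1) hj]
        rw [show ((arr.length : Int) - (((arr.length : Int) - ((j + 1 : Nat) : Int)) + 1)) = ((j : Nat) : Int) by push_cast; ring]
        rw [PySem.List.pyGet?_natCast, List.getElem?_eq_getElem (by omega : j < arr.length),
          ← List.getD_eq_getElem arr 0 (by omega : j < arr.length)]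
        dsimp only
        rw [if_neg hne]
      · have hex' : ∃ i, i ≤ j ∧ pvStop arr i = true := by
          obtain ⟨i, hi, hs⟩ := hex
          refine ⟨i, ?_, hs⟩
          rcases Nat.eq_or_lt_of_le hi with h | h
          · exact absurd (h ▸ hs) hstop
          · omega
        obtain ⟨j', h1, h2, h3, h4⟩ := ih f' (by omega) (by omega) hex'
        refine ⟨j', by omega, h2, ?_, ?_⟩
        · intro i hlt hle
          rcases Nat.eq_or_lt_of_le hle with h | h
          · subst h; exact Bool.eq_false_iff.mpr (fun hh => hstop hh)
          · exact h3 i hlt (by omega)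
        · have heq : arr.getD (j + 1) 0 = arr.getD j 0 := by
            simp only [pvStop, bne_iff_ne, Decidable.not_not] at hstop
            exact hstop.symm
          simp only [pyAInner]
          rw [pyGet_at arr (j + 1) hj]
          rw [show ((arr.length : Int) - (((arr.length : Int) - ((j + 1 : Nat) : Int)) + 1)) = ((j : Nat) : Int) by push_cast; ring]
          rw [PySem.List.pyGet?_natCast, List.getElem?_eq_getElem (by omega : j < arr.length),
            ← List.getD_eq_getElem arr 0 (by omega : j < arr.length)]
          dsimp only
          rw [if_pos heq, rev_drop_step arr j (by omega)]
          rw [show ((arr.length : Int) - ((j + 1 : Nat) : Int)) + 1 = (arr.length : Int) - ((j : Nat) : Int) by push_cast; ring]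
          exact h4

theorem outerA (arr : List Int) :
    ∀ j, j < arr.length → ∀ f r, j + 2 ≤ f → refGo arr j = some r →
    pyAOuter arr f ((arr.drop (j + 1)).reverse) ((arr.length : Int) - (j : Int)) = some r := by
  intro j
  induction j using Nat.strong_induction_on with
  | _ j ih =>
      intro hj f r hf href
      obtain ⟨f', rfl⟩ : ∃ f', f = f' + 1 := ⟨f - 1, by omega⟩
      simp only [pyAOuter]
      rw [pyGet_at arr j hj]
      dsimp only
      rw [rev_drop_step arr j hj]
      have hex : ∃ i, i ≤ j ∧ pvStop arr i = true := by
        obtain ⟨i, hi, hs, _⟩ := refGo_some_stop arr j r href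
        exact ⟨i, hi, hs⟩
      obtain ⟨j', hle, hstop, hno, hinner⟩ :=
        innerA arr j (2 * arr.length + 5) hj (by omega) hex
      rw [hinner]
      dsimp only
      rw [show ((arr.length : Int) - ((arr.length : Int) - ((j' : Nat) : Int))) = ((j' : Nat) : Int) by ring]
      rw [comp_take arr j' (by omega)]
      have hrev : ((arr.drop j').reverse).sum = (arr.drop j').sum := List.sum_reverse _
      have hskip : refGo arr j = refGo arr j' := refGo_skip arr j j' hle hno
      by_cases hsum : (arr.drop j').sum > (arr.take j').sum
      · rw [if_pos (by rw [hrev]; exact hsum)]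
        rw [hskip, refGo_stop_some arr j' hstop hsum] at href
        exact congrArg some (Option.some.inj href)
      · rw [if_neg (by rw [hrev]; exact hsum)]
        have hj'pos : j' ≠ 0 := by
          intro h0
          subst h0
          rw [hskip, refGo_stop_none arr 0 hsum] at href
          simp at href
        rw [hskip, refGo_stop_none arr j' hsum, if_neg hj'pos] at href
        have := ih (j' - 1) (by omega) (by omega) f' r (by omega) href
        rw [show j' - 1 + 1 = j' by omega] at this
        rw [show (arr.length : Int) - (((j' - 1 : Nat)) : Int) = (arr.length : Int) - ((j' : Nat) : Int) + 1 by omega] at this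
        exact this

-- ===== B-side loop characterisation =====
theorem innerB (arr : List Int) (v : Int) :
    ∀ k, k ≤ arr.length →
    ∃ k', k' ≤ k ∧
      pyBInner arr v ((arr.drop k).reverse) ((arr.drop k).sum) k =
        ((arr.drop k').reverse, (arr.drop k').sum, k') ∧
      (∀ i, k' ≤ i → i < k → arr.getD i 0 = v) ∧
      (k' = 0 ∨ arr.getD (k' - 1) 0 ≠ v) := by
  intro k
  induction k with
  | zero =>
      intro _
      exact ⟨0, le_refl _, rfl, by omega, Or.inl rfl⟩
  | succ k ih =>
      intro hk
      by_cases hv : arr.getD k 0 = v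
      · obtain ⟨k', h1, h2, h3, h4⟩ := ih (by omega)
        refine ⟨k', by omega, ?_, ?_, h4⟩
        · have e1 : (arr.drop (k + 1)).reverse ++ [v] = (arr.drop k).reverse := by
            rw [← hv]; exact rev_drop_step arr k (by omega)
          have e2 : (arr.drop (k + 1)).sum + v = (arr.drop k).sum := by
            rw [← hv]; exact sum_drop_step arr k (by omega)
          simp only [pyBInner, if_pos hv]
          rw [e1, e2]
          exact h2
        · intro i hi1 hi2
          rcases Nat.lt_or_ge i k with h | h
          · exact h3 i hi1 h
          · have : i = k := by omega
            subst this; exact hv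
      · refine ⟨k + 1, le_refl _, ?_, by omega, Or.inr (by simpa using hv)⟩
        simp only [pyBInner, if_neg hv]

theorem outerB (arr : List Int) :
    ∀ k, 1 ≤ k → k ≤ arr.length → ∀ f, k ≤ f → ∀ r, refGo arr (k - 1) = some r →
    pyBOuter arr arr.sum ((arr.drop k).reverse) ((arr.drop k).sum) k f = some r := by
  intro k
  induction k using Nat.strong_induction_on with
  | _ k ih =>
      intro hk1 hkn f hfk r href
      obtain ⟨f', rfl⟩ : ∃ f', f = f' + 1 := ⟨f - 1, by omega⟩
      obtain ⟨k0, rfl⟩ : ∃ k0, k = k0 + 1 := ⟨k - 1, by omega⟩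
      obtain ⟨k', hle, hrun, hall, hbd⟩ := innerB arr (arr.getD k0 0) (k0 + 1) hkn
      have hk'le : k' ≤ k0 := by
        rcases Nat.eq_or_lt_of_le hle with h | h
        · exfalso
          rcases hbd with h0 | hne
          · omega
          · subst h; simp at hne
        · omega
      simp only [pyBOuter]
      rw [hrun]
      have hno : ∀ i, k' < i → i ≤ k0 + 1 - 1 → pvStop arr i = false := by
        intro i h1 h2
        obtain ⟨i', rfl⟩ : ∃ i', i = i' + 1 := ⟨i - 1, by omega⟩
        simp only [pvStop, bne_eq_false_iff_eq]
        rw [hall i' (by omega) (by omega), hall (i' + 1) (by omega) (by omega)]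
      have hskip : refGo arr (k0 + 1 - 1) = refGo arr k' :=
        refGo_skip arr (k0 + 1 - 1) k' (by omega) hno
      by_cases hsum : (arr.drop k').sum > (arr.take k').sum
      · rw [if_pos ((sum_split arr k').mp hsum)]
        rw [hskip] at href
        have : r = ((arr.drop k').reverse, arr.take k') := by
          rcases k' with _ | k''
          · simp only [refGo] at href
            split at href
            · exact (Option.some.inj href).symm
            · exact absurd href (by simp)
          · simp only [refGo] at href
            split at href
            · exact (Option.some.inj href).symm
            · rename_i hcond
              exfalso
              apply hcond
              refine ⟨?_, hsum⟩
              simp only [pvStop, bne_iff_ne]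
              rcases hbd with h0 | hne
              · omega
              · have hv2 : arr.getD (k'' + 1) 0 = arr.getD k0 0 :=
                  hall (k'' + 1) (le_refl _) (by omega)
                simp only [Nat.add_sub_cancel] at hne
                rw [hv2]
                exact hne
        rw [this]
      · rw [if_neg (fun hh => hsum ((sum_split arr k').mpr hh))]
        have hk'pos : k' ≠ 0 := by
          intro h0
          subst h0
          rw [hskip, refGo_stop_none arr 0 hsum] at href
          simp at href
        rw [hskip, refGo_stop_none arr k' hsum, if_neg hk'pos] at href
        exact ih k' (by omega) (by omega) (by omega) f' (by omega) r href

-- pvStop written with the wrap-around index (k + n - 1) % n, as D_find_sub_arr states it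
theorem stop_bridge (arr : List Int) (k : Nat) (hk : k < arr.length) :
    (pvStop arr k = true) ↔ arr.getD ((k + arr.length - 1) % arr.length) 0 ≠ arr.getD k 0 := by
  cases k with
  | zero =>
      simp only [pvStop, bne_iff_ne, Nat.zero_add]
      rw [Nat.mod_eq_of_lt (by omega)]
      exact ne_comm
  | succ k =>
      simp only [pvStop, bne_iff_ne]
      rw [show k + 1 + arr.length - 1 = arr.length + k by omega, Nat.add_mod_left,
        Nat.mod_eq_of_lt (by omega)]


-- ===== wrap-around analysis (for the tightness theorem) =====

-- A's inner loop only ever appends to the accumulator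
theorem innerA_mono (arr : List Int) :
    ∀ f A ct A1 ct1, pyAInner arr f A ct = some (A1, ct1) → A.length ≤ A1.length := by
  intro f
  induction f with
  | zero => intro A ct A1 ct1 h; simp [pyAInner] at h
  | succ f ih =>
      intro A ct A1 ct1 h
      simp only [pyAInner] at h
      split at h
      · split at h
        · exact le_trans (by simp) (ih _ _ _ _ h)
        · cases h; simp
      · cases h

-- A's outer loop strictly grows the accumulator before any return
theorem outerA_mono (arr : List Int) :
    ∀ f A ct r, pyAOuter arr f A ct = some r → A.length < r.1.length := by
  intro f
  induction f with
  | zero => intro A ct r h; simp [pyAOuter] at h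
  | succ f ih =>
      intro A ct r h
      simp only [pyAOuter] at h
      cases hx : PySem.List.pyGet? arr ((arr.length : Int) - ct) with
      | none => rw [hx] at h; cases h
      | some x =>
        rw [hx] at h
        dsimp only at h
        cases hin : pyAInner arr (2 * arr.length + 5) (A ++ [x]) ct with
        | none => rw [hin] at h; cases h
        | some p =>
          obtain ⟨A1, ct1⟩ := p
          rw [hin] at h
          dsimp only at h
          have h1 := innerA_mono arr _ _ _ _ _ hin
          simp only [List.length_append, List.length_cons, List.length_nil] at h1
          split at h
          · injection h with h'
            subst h'
            simp only []
            omega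
          · have h2 := ih _ _ _ h
            omega

-- once the scan has wrapped (counter n + m, accumulator already n + m long), any
-- returned accumulator is longer than the array
theorem innerA_wrap (arr : List Int) :
    ∀ f m acc, 1 ≤ m → m ≤ arr.length → acc.length = arr.length + m →
    pyAInner arr f acc ((arr.length : Int) + (m : Int)) = none ∨
    ∃ A1 ct1, pyAInner arr f acc ((arr.length : Int) + (m : Int)) = some (A1, ct1) ∧
      arr.length < A1.length := by
  intro f
  induction f with
  | zero => intro m acc _ _ _; left; rfl
  | succ f ih =>
      intro m acc hm1 hmn hlen
      simp only [pyAInner]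
      rw [show (arr.length : Int) - ((arr.length : Int) + (m : Int)) = -((m : Nat) : Int) by
        ring]
      rw [PySem.List.pyGet?_neg_natCast arr m hm1 hmn,
        List.getElem?_eq_getElem (by omega : arr.length - m < arr.length)]
      by_cases hm : m < arr.length
      · rw [show (arr.length : Int) - ((arr.length : Int) + (m : Int) + 1) = -(((m + 1 : Nat)) : Int) by
          push_cast; ring]
        rw [PySem.List.pyGet?_neg_natCast arr (m + 1) (by omega) (by omega),
          List.getElem?_eq_getElem (by omega : arr.length - (m + 1) < arr.length)]
        dsimp only
        by_cases heq : arr[arr.length - m] = arr[arr.length - (m + 1)]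
        · rw [if_pos heq]
          have := ih (m + 1) (acc ++ [arr[arr.length - (m + 1)]]) (by omega) (by omega)
            (by simp; omega)
          rw [show (arr.length : Int) + (m : Int) + 1 = (arr.length : Int) + (((m + 1 : Nat)) : Int) by
            push_cast; ring]
          exact this
        · rw [if_neg heq]
          right
          exact ⟨acc, _, rfl, by omega⟩
      · have hnone : PySem.List.pyGet? arr ((arr.length : Int) - ((arr.length : Int) + (m : Int) + 1)) = none := by
          rw [PySem.List.pyGet?_eq_none_iff]
          simp only [PySem.Raise.InRange]
          omega
        rw [hnone]
        left
        rfl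

-- if no boundary up to j pauses the scan, the inner loop runs off the left end into the wrap
theorem innerA_nostop (arr : List Int) :
    ∀ j, j < arr.length → (∀ i, i ≤ j → pvStop arr i = false) → ∀ f,
    pyAInner arr f ((arr.drop j).reverse) ((arr.length : Int) - (j : Int)) = none ∨
    ∃ A1 ct1,
      pyAInner arr f ((arr.drop j).reverse) ((arr.length : Int) - (j : Int)) = some (A1, ct1) ∧
      arr.length < A1.length := by
  intro j
  induction j with
  | zero =>
      intro hj hno f
      cases f with
      | zero => left; rfl
      | succ f =>
          have heq0 : arr.getD 0 0 = arr.getD (arr.length - 1) 0 := by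
            have h := hno 0 (le_refl _)
            simp only [pvStop, bne_eq_false_iff_eq] at h
            exact h
          have heq0' : arr[0]'(by omega) = arr[arr.length - 1]'(by omega) := by
            rw [← List.getD_eq_getElem arr 0 (by omega), ← List.getD_eq_getElem arr 0 (by omega)]
            exact heq0
          simp only [pyAInner, Nat.cast_zero, sub_zero, sub_self]
          rw [show (arr.length : Int) - ((arr.length : Int) + 1) = -1 by ring]
          rw [PySem.List.pyGet?_zero, PySem.List.pyGet?_neg_one,
            List.getElem?_eq_getElem (by omega : 0 < arr.length), List.getLast?_eq_getElem?,
            List.getElem?_eq_getElem (by omega : arr.length - 1 < arr.length)]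
          dsimp only
          rw [if_pos heq0']
          have := innerA_wrap arr f 1 ((arr.drop 0).reverse ++ [arr[arr.length - 1]'(by omega)])
            (le_refl _) (by omega) (by simp)
          rw [show (arr.length : Int) + ((1 : Nat) : Int) = (arr.length : Int) + 1 by norm_num]
            at this
          exact this
  | succ j ih =>
      intro hj hno f
      cases f with
      | zero => left; rfl
      | succ f =>
          have heq : arr.getD (j + 1) 0 = arr.getD j 0 := by
            have h := hno (j + 1) (le_refl _)
            simp only [pvStop, bne_eq_false_iff_eq] at h
            exact h.symm
          simp only [pyAInner]
          rw [pyGet_at arr (j + 1) hj]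
          rw [show ((arr.length : Int) - (((arr.length : Int) - ((j + 1 : Nat) : Int)) + 1)) = ((j : Nat) : Int) by push_cast; ring]
          rw [PySem.List.pyGet?_natCast, List.getElem?_eq_getElem (by omega : j < arr.length),
            ← List.getD_eq_getElem arr 0 (by omega : j < arr.length)]
          dsimp only
          rw [if_pos heq, rev_drop_step arr j (by omega)]
          rw [show ((arr.length : Int) - ((j + 1 : Nat) : Int)) + 1 = (arr.length : Int) - ((j : Nat) : Int) by push_cast; ring]
          exact ih (by omega) (fun i hi => hno i (by omega)) f

-- when no boundary ever has a majority suffix (and the total is positive), any value A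
-- returns carries an accumulator longer than the array
theorem outerA_nofp (arr : List Int)
    (hA : ∀ k, k < arr.length → pvStop arr k = true → 2 * (arr.drop k).sum ≤ arr.sum)
    (htot : 0 < arr.sum) :
    ∀ j, j < arr.length → ∀ f r,
    pyAOuter arr f ((arr.drop (j + 1)).reverse) ((arr.length : Int) - (j : Int)) = some r →
    arr.length < r.1.length := by
  intro j
  induction j using Nat.strong_induction_on with
  | _ j ih =>
      intro hj f r hsome
      cases f with
      | zero => simp [pyAOuter] at hsome
      | succ f =>
          simp only [pyAOuter] at hsome
          rw [pyGet_at arr j hj] at hsome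
          dsimp only at hsome
          rw [rev_drop_step arr j hj] at hsome
          by_cases hex : ∃ i, i ≤ j ∧ pvStop arr i = true
          · obtain ⟨j', hle, hstop, hno, hinner⟩ :=
              innerA arr j (2 * arr.length + 5) hj (by omega) hex
            rw [hinner] at hsome
            dsimp only at hsome
            rw [show ((arr.length : Int) - ((arr.length : Int) - ((j' : Nat) : Int))) = ((j' : Nat) : Int) by ring] at hsome
            rw [comp_take arr j' (by omega)] at hsome
            have hj'1 : 1 ≤ j' := by
              rcases Nat.eq_zero_or_pos j' with h0 | h
              · exfalso
                subst h0
                have := hA 0 (by omega) hstop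
                simp at this
                omega
              · exact h
            have hsum : ¬ (((arr.drop j').reverse).sum > (arr.take j').sum) := by
              have h1 := hA j' (by omega) hstop
              have h2 := List.sum_take_add_sum_drop arr j'
              rw [List.sum_reverse]
              omega
            rw [if_neg hsum] at hsome
            rw [show (arr.length : Int) - ((j' : Nat) : Int) + 1 = (arr.length : Int) - (((j' - 1 : Nat)) : Int) by omega] at hsome
            rw [show arr.drop j' = arr.drop ((j' - 1) + 1) by rw [show j' - 1 + 1 = j' by omega]] at hsome
            exact ih (j' - 1) (by omega) (by omega) f r hsome
          · have hno : ∀ i, i ≤ j → pvStop arr i = false := by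
              intro i hi
              by_cases h : pvStop arr i = true
              · exact absurd ⟨i, hi, h⟩ hex
              · exact Bool.eq_false_iff.mpr h
            rcases innerA_nostop arr j hj hno (2 * arr.length + 5) with hnone | ⟨A1, ct1, hs2, hbig⟩
            · rw [hnone] at hsome
              cases hsome
            · rw [hs2] at hsome
              dsimp only at hsome
              split at hsome
              · cases hsome
                simpa using hbig
              · have := outerA_mono arr f _ _ r hsome
                omega

-- B's value when no boundary has a majority suffix and the total is positive
theorem outerB_nofp (arr : List Int)
    (hA : ∀ k, k < arr.length → pvStop arr k = true → 2 * (arr.drop k).sum ≤ arr.sum)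
    (htot : 0 < arr.sum) :
    ∀ k, 1 ≤ k → k ≤ arr.length → ∀ f, k ≤ f →
    pyBOuter arr arr.sum ((arr.drop k).reverse) ((arr.drop k).sum) k f = some (arr.reverse, []) := by
  intro k
  induction k using Nat.strong_induction_on with
  | _ k ih =>
      intro hk1 hkn f hfk
      obtain ⟨f', rfl⟩ : ∃ f', f = f' + 1 := ⟨f - 1, by omega⟩
      obtain ⟨k0, rfl⟩ : ∃ k0, k = k0 + 1 := ⟨k - 1, by omega⟩
      obtain ⟨k', hle, hrun, hall, hbd⟩ := innerB arr (arr.getD k0 0) (k0 + 1) hkn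
      have hk'le : k' ≤ k0 := by
        rcases Nat.eq_or_lt_of_le hle with h | h
        · exfalso
          rcases hbd with h0 | hne
          · omega
          · subst h; simp at hne
        · omega
      simp only [pyBOuter]
      rw [hrun]
      by_cases h0 : k' = 0
      · subst h0
        simp only [List.drop_zero]
        rw [if_pos (by omega : arr.sum > arr.sum - arr.sum)]
        simp
      · obtain ⟨k'', rfl⟩ : ∃ k'', k' = k'' + 1 := ⟨k' - 1, by omega⟩
        have hstop : pvStop arr (k'' + 1) = true := by
          simp only [pvStop, bne_iff_ne]
          rcases hbd with hx | hne
          · omega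
          · simp only [Nat.add_sub_cancel] at hne
            rw [hall (k'' + 1) (le_refl _) (by omega)]
            exact hne
        have h1 := hA (k'' + 1) (by omega) hstop
        have h2 := List.sum_take_add_sum_drop arr (k'' + 1)
        rw [if_neg (by omega : ¬ ((arr.drop (k'' + 1)).sum > arr.sum - (arr.drop (k'' + 1)).sum))]
        exact ih (k'' + 1) (by omega) (by omega) (by omega) f' (by omega)

-- ===== VERDICT (by name: the statement is the Claim_ definition above) =====
theorem find_sub_arr_spec : Claim_unchanged_find_sub_arr := by
  intro arr _ hpre hnd
  obtain ⟨hlen, hex⟩ := hpre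
  have hFP : ∃ k, k < arr.length ∧ pvStop arr k = true ∧
      (arr.drop k).sum > (arr.take k).sum := by
    by_cases hA : ∀ k, k < arr.length →
        arr.getD ((k + arr.length - 1) % arr.length) 0 ≠ arr.getD k 0 →
        2 * (arr.drop k).sum ≤ arr.sum
    · exfalso
      obtain ⟨k, hk, hstop, hcase⟩ := hex
      have hle := hA k hk ((stop_bridge arr k hk).mp hstop)
      rcases hcase with h | h
      · omega
      · exact hnd ⟨by omega, hA⟩
    · push Not at hA
      obtain ⟨k, hk, hne, hgt⟩ := hA
      have hsplit := List.sum_take_add_sum_drop arr k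
      exact ⟨k, hk, (stop_bridge arr k hk).mpr hne, by omega⟩
  obtain ⟨k, hk, h1, h2⟩ := hFP
  have hsome : (refGo arr (arr.length - 1)).isSome :=
    refGo_isSome arr k (arr.length - 1) (by omega) h1 h2
  obtain ⟨r, hr⟩ := Option.isSome_iff_exists.mp hsome
  have hA : pyAOuter arr (2 * arr.length + 5) [] 1 = some r := by
    have := outerA arr (arr.length - 1) (by omega) (2 * arr.length + 5) r (by omega) hr
    rw [show (arr.length - 1 : Nat) + 1 = arr.length by omega, List.drop_length] at this
    rw [show ((arr.length : Int) - (((arr.length - 1 : Nat)) : Int)) = 1 by omega] at this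
    simpa using this
  have hB : pyBOuter arr arr.sum [] 0 arr.length arr.length = some r := by
    have := outerB arr arr.length (by omega) (le_refl _) arr.length (le_refl _) r hr
    rw [List.drop_length] at this
    simpa using this
  simp only [find_sub_arr, find_sub_arr_alt]
  rw [hA, hB]

theorem find_sub_arr_changed : Claim_changed_find_sub_arr := by
  unfold Claim_changed_find_sub_arr; decide

theorem find_sub_arr_tight : Claim_exact_find_sub_arr := by
  intro arr _ hpre hd
  obtain ⟨hlen, hex⟩ := hpre
  obtain ⟨htot, hA'⟩ := hd
  have hA : ∀ k, k < arr.length → pvStop arr k = true → 2 * (arr.drop k).sum ≤ arr.sum :=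
    fun k hk hs => hA' k hk ((stop_bridge arr k hk).mp hs)
  have hB : find_sub_arr_alt arr = (arr.reverse, []) := by
    have h := outerB_nofp arr hA htot arr.length (by omega) (le_refl _) arr.length (le_refl _)
    rw [List.drop_length] at h
    simp only [find_sub_arr_alt]
    simp only [List.reverse_nil, List.sum_nil] at h
    rw [h]
    rfl
  rw [hB]
  unfold find_sub_arr
  cases hcase : pyAOuter arr (2 * arr.length + 5) [] 1 with
  | none =>
      simp only [Option.getD]
      intro h
      have h1 : ([] : List Int) = arr.reverse := congrArg Prod.fst h
      have h2 := congrArg List.length h1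
      simp at h2
      omega
  | some r =>
      have hbig : arr.length < r.1.length := by
        apply outerA_nofp arr hA htot (arr.length - 1) (by omega) (2 * arr.length + 5) r
        rw [show (arr.length - 1 : Nat) + 1 = arr.length by omega, List.drop_length,
          show ((arr.length : Int) - (((arr.length - 1 : Nat)) : Int)) = 1 by omega]
        exact hcase
      simp only [Option.getD]
      intro h
      have h1 := congrArg (fun p : List Int × List Int => p.1.length) h
      simp at h1
      omega
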